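-- pv_equiv track=rewrite | github.com/raymon-02/uwq-algo | 02_class/03_best_seat.py | best_seat
-- ===== SOURCE A (Python) =====
-- import math
--
-- def best_seat(seats):
--     max_r = 0
--     rr = 0
--     curr = 0
--     ri = 0
--     for i, seat in enumerate(seats):
--         if seat == 1:
--             if max_r < curr:
--                 max_r = curr
--                 rr = ri
--             curr = 0
--         else:
--             if curr == 0:
--                 ri = i
--             curr += 1
--     if max_r < curr:
--         max_r = curr
--         rr = ri
--
--     return rr + math.ceil(max_r / 2) - 1
-- ===== SOURCE B (Python) =====
-- def best_seat(seats):
--     ones = [i for i, s in enumerate(seats) if s == 1]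
--     bounds = [-1] + ones + [len(seats)]
--     best_len = 0
--     best_start = 0
--     for l, r in zip(bounds, bounds[1:]):
--         length = r - l - 1
--         if best_len < length:
--             best_len = length
--             best_start = l + 1
--     return best_start + (best_len + 1) // 2 - 1
-- ===== Notes on version B (the rewrite author's own statement) =====
-- stated objective: alternative
-- what changed: Replaces A's single-pass state machine (running zero-run length/start with a trailing flush) by a boundary decomposition: collect the indices of occupied seats, bracket them with -1 and len(seats), and scan consecutive boundary pairs as gaps, keeping the leftmost longest.
import Mathlib
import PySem

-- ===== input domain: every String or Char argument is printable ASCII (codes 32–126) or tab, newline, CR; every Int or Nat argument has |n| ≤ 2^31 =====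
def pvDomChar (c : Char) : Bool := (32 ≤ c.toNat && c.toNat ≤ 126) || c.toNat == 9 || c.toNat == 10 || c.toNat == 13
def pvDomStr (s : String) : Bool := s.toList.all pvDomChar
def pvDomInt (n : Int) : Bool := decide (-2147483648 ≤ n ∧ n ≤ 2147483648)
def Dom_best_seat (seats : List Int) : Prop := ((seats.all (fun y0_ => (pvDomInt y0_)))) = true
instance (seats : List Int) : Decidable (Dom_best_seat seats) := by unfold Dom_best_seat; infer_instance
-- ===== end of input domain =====

-- B replaces A's running zero-run state machine by a boundary decomposition (indices of 1s,
-- bracketed by -1 and len, scanned pairwise as gaps); objective: alternative decomposition, same cost.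

-- ===== PORT A =====
-- math.ceil(n / 2) for a Python int n equals -((-n) // 2); exact for every integer n
def pyCeilHalf (n : Int) : Int := -(PySem.Int.floordiv (-n) 2)

-- loop body of A, one step of the enumerate loop on state (max_r, rr, curr, ri)
def stepA (st : Int × Int × Int × Int) (p : Int × Int) : Int × Int × Int × Int :=
  match st, p with
  | (max_r, rr, curr, ri), (i, seat) =>
    if seat == 1 then
      if max_r < curr then (curr, ri, 0, ri) else (max_r, rr, 0, ri)
    else
      (max_r, rr, curr + 1, if curr == 0 then i else ri)

-- A's trailing "if max_r < curr" after the loop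
def finA (st : Int × Int × Int × Int) : Int × Int :=
  match st with
  | (max_r, rr, curr, ri) => if max_r < curr then (curr, ri) else (max_r, rr)

def best_seat (seats : List Int) : Int :=
  let st := (PySem.List.enumerate seats 0).foldl stepA (0, 0, 0, 0)
  let fin := finA st
  fin.2 + pyCeilHalf fin.1 - 1

-- ===== PORT B =====
-- loop body of B on state (best_len, best_start), pair p = (l, r) of consecutive boundaries
def stepB (st : Int × Int) (p : Int × Int) : Int × Int :=
  let length := p.2 - p.1 - 1
  if st.1 < length then (length, p.1 + 1) else st

def best_seat_alt (seats : List Int) : Int :=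
  let ones := ((PySem.List.enumerate seats 0).filter (fun p => p.2 == 1)).map Prod.fst
  let bounds := (-1 : Int) :: (ones ++ [(seats.length : Int)])
  let st := (bounds.zip bounds.tail).foldl stepB (0, 0)
  st.2 + PySem.Int.floordiv (st.1 + 1) 2 - 1

-- ===== PRECONDITION & SPEC =====
def Spec_best_seat (seats : List Int) (out : Int) : Prop := out = best_seat_alt seats
instance (seats : List Int) (out : Int) : Decidable (Spec_best_seat seats out) := by unfold Spec_best_seat; infer_instance

-- ===== CLAIM (what is proved, stated in full; the proofs are below) =====
def Claim_equal_best_seat : Prop := ∀ (seats : List Int), Dom_best_seat seats → Spec_best_seat seats (best_seat seats)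

-- ===== LEMMAS AND PROOFS =====

theorem pyCeilHalf_eq (n : Int) : pyCeilHalf n = PySem.Int.floordiv (n + 1) 2 := by
  unfold pyCeilHalf
  rw [PySem.Int.floordiv_eq_ediv_of_pos (by norm_num : (0:Int) < 2),
      PySem.Int.floordiv_eq_ediv_of_pos (by norm_num : (0:Int) < 2)]
  omega

-- Invariant link between A's state machine and B's boundary-pair scan:
-- after processing the suffix `xs` starting at index `i`, with `l` the previous boundary
-- (index of the last 1 seen, or -1), A's finalized (max_r, rr) equals B's fold over the
-- boundary pairs of that suffix.
theorem loop_link (xs : List Int) : ∀ (i l m r ri : Int), l < i → 0 ≤ m →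
    (i - l - 1 ≠ 0 → ri = l + 1) →
    finA ((PySem.List.enumerate xs i).foldl stepA (m, r, i - l - 1, ri)) =
      ((l :: ((((PySem.List.enumerate xs i).filter (fun p => p.2 == 1)).map Prod.fst)
          ++ [i + (xs.length : Int)])).zip
        ((((PySem.List.enumerate xs i).filter (fun p => p.2 == 1)).map Prod.fst)
          ++ [i + (xs.length : Int)])).foldl stepB (m, r) := by
  induction xs with
  | nil =>
    intro i l m r ri hl hm hri
    simp [PySem.List.enumerate, finA, stepB]
    split_ifs with h
    · rw [hri (by omega)]
    · rfl
  | cons x xs ih =>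
    intro i l m r ri hl hm hri
    rw [PySem.List.enumerate_cons]
    by_cases hx : x = 1
    · -- seat == 1 : close the current run, boundary moves to i
      subst hx
      simp only [List.foldl_cons, List.filter_cons, beq_self_eq_true, if_pos, List.map_cons,
        List.cons_append, List.zip_cons_cons, List.length_cons, Nat.cast_add, Nat.cast_one]
      rw [show i + ((xs.length : Int) + 1) = (i + 1) + (xs.length : Int) from by ring]
      by_cases hcmp : m < i - l - 1
      · have hri' : ri = l + 1 := hri (by omega)
        have h1 : stepA (m, r, i - l - 1, ri) (i, 1) = (i - l - 1, ri, (i+1) - i - 1, ri) := by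
          simp [stepA, hcmp]
        have h2 : stepB (m, r) (l, i) = (i - l - 1, l + 1) := by
          simp [stepB, hcmp]
        rw [h1, h2, hri']
        exact ih (i+1) i (i - l - 1) (l+1) (l+1) (by omega) (by omega) (by omega)
      · have h1 : stepA (m, r, i - l - 1, ri) (i, 1) = (m, r, (i+1) - i - 1, ri) := by
          simp [stepA, hcmp]
        have h2 : stepB (m, r) (l, i) = (m, r) := by
          simp [stepB, hcmp]
        rw [h1, h2]
        exact ih (i+1) i m r ri (by omega) hm (by omega)
    · -- seat != 1 : extend the current run
      have hx' : (x == 1) = false := by simp [hx]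
      have hri' : (i + 1) - l - 1 ≠ 0 → (if (i - l - 1) == 0 then i else ri) = l + 1 := by
        intro _
        by_cases hc : i - l - 1 = 0
        · simp [hc]; omega
        · simp [hc]; exact hri hc
      have h1 : stepA (m, r, i - l - 1, ri) (i, x)
          = (m, r, (i + 1) - l - 1, if (i - l - 1) == 0 then i else ri) := by
        simp [stepA, hx']; ring_nf
      simp only [List.foldl_cons, List.filter_cons, hx', Bool.false_eq_true, if_neg,
        not_false_eq_true, List.length_cons, Nat.cast_add, Nat.cast_one]
      rw [show i + ((xs.length : Int) + 1) = (i + 1) + (xs.length : Int) from by ring]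
      rw [h1]
      exact ih (i+1) l m r _ (by omega) hm hri'

-- ===== VERDICT (by name: the statement is the Claim_ definition above) =====
theorem best_seat_spec : Claim_equal_best_seat := by
  intro seats _
  unfold Spec_best_seat best_seat best_seat_alt
  have h := loop_link seats 0 (-1) 0 0 0 (by omega) (by omega) (by omega)
  have h0 : (0 : Int) - (-1) - 1 = 0 := by ring
  rw [h0] at h
  simp only [zero_add] at h
  simp only [List.tail_cons, h, pyCeilHalf_eq]
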